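-- pv_equiv track=rewrite | github.com/PatrickHenson/puzzle_script | puzzle_script.py | decode_substitution_cipher
-- ===== SOURCE A (Python) =====
-- def reverse_key(cipher_key):
--     reversed_key = {}
--     for k in cipher_key.keys():
--         reversed_key[cipher_key[k]] = k
--     return reversed_key
--
-- def decode_substitution_cipher(message, cipher_key):
--     reversed_key = reverse_key(cipher_key)
--     decoded_message = ""
--     for c in message.lower():
--         if c in reversed_key.keys():
--             decoded_message += reversed_key[c]
--         elif c == ' ' or c == '\n':
--             decoded_message += c
--     return decoded_message
-- ===== SOURCE B (Python) =====
-- def find_plain(cipher_key, c):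
--     for k, v in cipher_key.items():
--         if v == c:
--             return k
--     return None
--
-- def decode_substitution_cipher(message, cipher_key):
--     out = []
--     cache = {}
--     for c in message.lower():
--         if c not in cache:
--             cache[c] = find_plain(cipher_key, c)
--         k = cache[c]
--         if k is not None:
--             out.append(k)
--         elif c == ' ' or c == '\n':
--             out.append(c)
--     return ''.join(out)
-- ===== Notes on version B (the rewrite author's own statement) =====
-- stated objective: alternative
-- what changed: B drops the precomputed inverse dict: it finds each plaintext key by a first-match early-return scan of cipher_key.items(), memoized per distinct character, and joins collected pieces instead of string concatenation; Pre_ excludes inputs where some character of the lowercased message is the cipher value of two distinct key entries, where A's returned key is an accident of dict-overwrite order and either key is defensible.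
-- outside the precondition, e.g. on decode_substitution_cipher('a', {'x': 'a', 'y': 'a'}): A returns 'y', B returns 'x'
import Mathlib
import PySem

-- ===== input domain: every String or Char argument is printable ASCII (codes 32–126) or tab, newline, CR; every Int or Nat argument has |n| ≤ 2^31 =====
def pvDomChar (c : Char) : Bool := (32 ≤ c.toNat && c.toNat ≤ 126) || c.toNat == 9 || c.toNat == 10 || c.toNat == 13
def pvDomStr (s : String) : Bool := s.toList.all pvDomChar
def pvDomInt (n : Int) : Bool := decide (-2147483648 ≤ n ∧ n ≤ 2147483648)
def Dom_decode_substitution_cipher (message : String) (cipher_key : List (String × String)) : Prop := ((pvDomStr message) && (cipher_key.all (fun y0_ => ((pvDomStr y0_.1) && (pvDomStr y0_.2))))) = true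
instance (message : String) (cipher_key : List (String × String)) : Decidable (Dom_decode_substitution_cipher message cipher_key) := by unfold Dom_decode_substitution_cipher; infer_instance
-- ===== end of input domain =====

-- B replaces the precomputed inverse dict with a per-character first-match scan of the key pairs, memoized per distinct character (alternative decomposition, same result when no message character is an ambiguous cipher value).

-- ===== PORT A =====
-- reverse_key: iterate the dict's keys, insert value -> key (later keys overwrite)
def pvReverseKey (cipher_key : PySem.Dict String String) : PySem.Dict String String :=
  cipher_key.keys.foldl (fun rd k => rd.insert (cipher_key.getD k "") k) PySem.Dict.empty

def decode_substitution_cipher (message : String) (cipher_key : List (String × String)) : String :=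
  let ck := PySem.Dict.ofList cipher_key
  let rd := pvReverseKey ck
  (PySem.Str.lower message).toList.foldl
    (fun acc c =>
      let cs := String.ofList [c]
      if rd.contains cs then acc ++ rd.getD cs ""
      else if c = ' ' ∨ c = '\n' then acc ++ cs
      else acc) ""

-- ===== PORT B =====
-- find_plain: scan the pairs, return the first key whose value is cs (early return)
def pvFindPlain (items : List (String × String)) (cs : String) : Option String :=
  match items with
  | [] => none
  | kv :: t => if kv.2 = cs then some kv.1 else pvFindPlain t cs

def decode_substitution_cipher_alt (message : String) (cipher_key : List (String × String)) : String :=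
  let items := (PySem.Dict.ofList cipher_key).items
  let st := (PySem.Str.lower message).toList.foldl
    (fun (st : List String × PySem.Dict String (Option String)) c =>
      let cs := String.ofList [c]
      let cache := if st.2.contains cs then st.2 else st.2.insert cs (pvFindPlain items cs)
      (match cache.getD cs none with
       | some k => st.1 ++ [k]
       | none => if c = ' ' ∨ c = '\n' then st.1 ++ [cs] else st.1, cache))
    (([] : List String), PySem.Dict.empty)
  String.join st.1

-- ===== PRECONDITION & SPEC =====
-- Pre_ excludes inputs where some character of the lowercased message is the cipher value of
-- two distinct (dict-deduplicated) key entries: there A decodes it with the LAST such key (an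
-- accident of dict-overwrite order) while B's scan finds the FIRST, and either key is a
-- defensible answer for an ambiguous cipher.
def Pre_decode_substitution_cipher (message : String) (cipher_key : List (String × String)) : Prop :=
  ((PySem.Str.lower message).toList.all (fun c =>
    ((PySem.Dict.ofList cipher_key).values).count (String.ofList [c]) ≤ 1)) = true
instance (message : String) (cipher_key : List (String × String)) : Decidable (Pre_decode_substitution_cipher message cipher_key) := by unfold Pre_decode_substitution_cipher; infer_instance

def pvWitness_decode_substitution_cipher : String × (List (String × String)) :=
  ("ab c", [("x", "a"), ("y", "b")])

def Spec_decode_substitution_cipher (message : String) (cipher_key : List (String × String)) (out : String) : Prop := out = decode_substitution_cipher_alt message cipher_key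
instance (message : String) (cipher_key : List (String × String)) (out : String) : Decidable (Spec_decode_substitution_cipher message cipher_key out) := by unfold Spec_decode_substitution_cipher; infer_instance

-- ===== CLAIM =====
def Claim_equal_decode_substitution_cipher : Prop := ∀ (message : String) (cipher_key : List (String × String)), Dom_decode_substitution_cipher message cipher_key → Pre_decode_substitution_cipher message cipher_key → Spec_decode_substitution_cipher message cipher_key (decode_substitution_cipher message cipher_key)

-- ===== LEMMAS AND PROOFS =====

-- the reversed dict's lookup is a last-match fold over the inserted pairs
theorem pv_rev_get? (c : String) : ∀ (ps : List (String × String)) (d0 : PySem.Dict String String),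
    (ps.foldl (fun rd kv => rd.insert kv.2 kv.1) d0).get? c =
    ps.foldl (fun (o : Option String) kv => if kv.2 = c then some kv.1 else o) (d0.get? c) := by
  intro ps
  induction ps with
  | nil => intro d0; simp
  | cons kv t ih =>
    intro d0
    simp only [List.foldl_cons]
    rw [ih]
    by_cases h : kv.2 = c
    · subst h; simp [PySem.Dict.get?_insert_self]
    · rw [if_neg h, PySem.Dict.get?_insert_of_ne _ _ (Ne.symm h)]

-- a last-match fold over pairs none of whose values is c keeps its accumulator
theorem pv_fold_const (c : String) : ∀ (ps : List (String × String)) (o : Option String),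
    (∀ p ∈ ps, p.2 ≠ c) →
    ps.foldl (fun (o : Option String) kv => if kv.2 = c then some kv.1 else o) o = o := by
  intro ps
  induction ps with
  | nil => intro o _; rfl
  | cons kv t ih =>
    intro o h
    simp only [List.foldl_cons, if_neg (h kv (List.mem_cons_self))]
    exact ih o (fun p hp => h p (List.mem_cons_of_mem _ hp))

-- when at most one pair carries the value c, last match = first match
theorem pv_last_eq_first (c : String) : ∀ (ps : List (String × String)),
    (ps.map Prod.snd).count c ≤ 1 →
    ps.foldl (fun (o : Option String) kv => if kv.2 = c then some kv.1 else o) none =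
    pvFindPlain ps c := by
  intro ps
  induction ps with
  | nil => intro _; rfl
  | cons kv t ih =>
    intro hcnt
    rw [List.map_cons, List.count_cons] at hcnt
    simp only [List.foldl_cons, pvFindPlain]
    by_cases h : kv.2 = c
    · rw [if_pos h, if_pos h]
      have ht : (t.map Prod.snd).count c = 0 := by
        simp only [h, beq_self_eq_true, if_pos] at hcnt; omega
      rw [List.count_eq_zero] at ht
      exact pv_fold_const c t _ (fun p hp hpc => ht (hpc ▸ List.mem_map_of_mem hp))
    · rw [if_neg h, if_neg h]
      apply ih
      omega

-- the two character loops agree where A's reversed-dict lookup equals B's scan; B's cache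
-- only ever holds memoized pvFindPlain results
theorem pv_loop (items : List (String × String)) (rd : PySem.Dict String String) :
    ∀ (chars : List Char) (la : List String) (cache : PySem.Dict String (Option String)),
    (∀ c ∈ chars, rd.get? (String.ofList [c]) = pvFindPlain items (String.ofList [c])) →
    (∀ cs, cache.contains cs = true → cache.getD cs none = pvFindPlain items cs) →
    chars.foldl
      (fun acc c =>
        let cs := String.ofList [c]
        if rd.contains cs then acc ++ rd.getD cs ""
        else if c = ' ' ∨ c = '\n' then acc ++ cs
        else acc) (String.join la)
    = String.join ((chars.foldl
      (fun (st : List String × PySem.Dict String (Option String)) c =>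
        let cs := String.ofList [c]
        let cache := if st.2.contains cs then st.2 else st.2.insert cs (pvFindPlain items cs)
        (match cache.getD cs none with
         | some k => st.1 ++ [k]
         | none => if c = ' ' ∨ c = '\n' then st.1 ++ [cs] else st.1, cache)) (la, cache)).1) := by
  intro chars
  induction chars with
  | nil => intro la cache _ _; rfl
  | cons c t ih =>
    intro la cache hm hinv
    simp only [List.foldl_cons]
    set cs := String.ofList [c] with hcs
    set cache' := if cache.contains cs then cache else cache.insert cs (pvFindPlain items cs)
      with hcache'
    have hinv' : ∀ cs', cache'.contains cs' = true →
        cache'.getD cs' none = pvFindPlain items cs' := by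
      intro cs' h'
      rw [hcache']
      by_cases hmem : cache.contains cs = true
      · rw [if_pos hmem]
        apply hinv
        rwa [hcache', if_pos hmem] at h'
      · rw [if_neg hmem]
        by_cases he : cs' = cs
        · subst he; rw [PySem.Dict.getD_insert_self]
        · rw [PySem.Dict.getD_insert, if_neg he]
          apply hinv
          rw [hcache', if_neg hmem] at h'
          rw [PySem.Dict.contains_insert] at h'
          simpa [he] using h'
    have hfr : cache'.getD cs none = pvFindPlain items cs := by
      apply hinv'
      rw [hcache']
      by_cases hmem : cache.contains cs = true
      · rw [if_pos hmem]; exact hmem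
      · rw [if_neg hmem]; exact PySem.Dict.contains_insert_self _ _ _
    have hjoin : ∀ s, String.join la ++ s = String.join (la ++ [s]) := by
      intro s; simp [String.join, List.foldl_append]
    have hc : rd.contains cs = (rd.get? cs).isSome :=
      PySem.Dict.contains_eq_isSome_get? rd cs
    have hg : rd.getD cs "" = (rd.get? cs).getD "" := rfl
    have hmt : ∀ c' ∈ t, rd.get? (String.ofList [c']) = pvFindPlain items (String.ofList [c']) :=
      fun c' hc' => hm c' (List.mem_cons_of_mem _ hc')
    have hmc := hm c (List.mem_cons_self)
    rw [← hcs] at hmc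
    cases hfp : pvFindPlain items cs with
    | some k =>
      simp only [hfr, hc, hg, hmc, hfp, Option.isSome_some, if_true, Option.getD_some]
      rw [hjoin]
      exact ih _ _ hmt hinv'
    | none =>
      simp only [hfr, hc, hmc, hfp, Option.isSome_none, Bool.false_eq_true, if_false]
      by_cases h2 : c = ' ' ∨ c = '\n'
      · rw [if_pos h2, if_pos h2, hjoin]
        exact ih _ _ hmt hinv'
      · rw [if_neg h2, if_neg h2]
        exact ih _ _ hmt hinv'

-- ===== VERDICT =====
theorem decode_substitution_cipher_spec : Claim_equal_decode_substitution_cipher := by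
  intro message cipher_key _ hpre
  unfold Spec_decode_substitution_cipher decode_substitution_cipher decode_substitution_cipher_alt
  have hnd := PySem.Dict.nodup_keys_ofList cipher_key
  set d := PySem.Dict.ofList cipher_key with hd
  have hm : ∀ c ∈ (PySem.Str.lower message).toList,
      (pvReverseKey d).get? (String.ofList [c]) = pvFindPlain d.items (String.ofList [c]) := by
    intro c hc
    have hrev : pvReverseKey d = d.items.foldl (fun rd kv => rd.insert kv.2 kv.1) PySem.Dict.empty := by
      rw [pvReverseKey, PySem.Dict.items_eq_map_keys d hnd "", List.foldl_map]
    rw [hrev, pv_rev_get? _ d.items PySem.Dict.empty, PySem.Dict.get?_empty]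
    apply pv_last_eq_first
    rw [Pre_decode_substitution_cipher, List.all_eq_true] at hpre
    have := of_decide_eq_true (hpre c hc)
    simpa [PySem.Dict.values] using this
  have hinv0 : ∀ cs, (PySem.Dict.empty : PySem.Dict String (Option String)).contains cs = true →
      (PySem.Dict.empty : PySem.Dict String (Option String)).getD cs none = pvFindPlain d.items cs := by
    intro cs h
    rw [PySem.Dict.contains_empty] at h
    exact absurd h (by simp)
  have h := pv_loop d.items (pvReverseKey d) (PySem.Str.lower message).toList [] PySem.Dict.empty hm hinv0
  simpa using h
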